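-- pv_equiv track=rewrite | github.com/posl/comment_recommendation | script/split_gen/1_time/zh/243_D/2.py | solve
-- ===== SOURCE A (Python) =====
-- def solve(n,x,s):
--     ans = x
--     for i in range(n):
--         if s[i] == 'U':
--             ans = ans//2
--         elif s[i] == 'L':
--             ans = ans*2
--         elif s[i] == 'R':
--             ans = ans*2 + 1
--     return ans
-- ===== SOURCE B (Python) =====
-- def solve(n, x, s):
--     # First pass: reduce the moves to a stack (an 'L'/'R' immediately cancelled
--     # by a following 'U' is an exact no-op); second pass: apply the survivors.
--     stack = []
--     for i in range(n):
--         c = s[i]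
--         if c == 'U' and stack and stack[-1] != 'U':
--             stack.pop()
--         elif c in 'ULR':
--             stack.append(c)
--     ans = x
--     for c in stack:
--         if c == 'U':
--             ans //= 2
--         elif c == 'L':
--             ans = ans * 2
--         else:
--             ans = ans * 2 + 1
--     return ans
-- ===== Notes on version B (the rewrite author's own statement) =====
-- stated objective: alternative
-- what changed: Replaces A's direct per-character arithmetic on the node index with a two-pass scheme: a stack reduction that cancels each L/R immediately followed by a U (an exact no-op since (2x)//2 == (2x+1)//2 == x), then a single pass applying the surviving moves.
import Mathlib
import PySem

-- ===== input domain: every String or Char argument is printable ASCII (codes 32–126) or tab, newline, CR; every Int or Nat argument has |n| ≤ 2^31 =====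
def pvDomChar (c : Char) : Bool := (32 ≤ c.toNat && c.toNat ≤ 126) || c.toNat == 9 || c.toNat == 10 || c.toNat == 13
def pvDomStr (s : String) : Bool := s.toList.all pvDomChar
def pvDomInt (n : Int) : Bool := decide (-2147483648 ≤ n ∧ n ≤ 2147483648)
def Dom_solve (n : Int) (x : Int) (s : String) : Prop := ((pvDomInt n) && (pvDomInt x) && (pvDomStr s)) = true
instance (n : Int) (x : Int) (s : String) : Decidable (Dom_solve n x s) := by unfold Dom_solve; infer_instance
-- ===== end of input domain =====

-- B replaces A's direct per-character arithmetic with a stack reduction (an L/R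
-- cancelled by a following U is a no-op) followed by one apply pass: objective
-- 'alternative' — a genuinely different decomposition, same asymptotic cost.

-- ===== PORT A =====
-- A's loop body: one move applied to the accumulator (s[i] is pyGetD, in range under Pre_).
def moveA (ans : Int) (c : Char) : Int :=
  if c = 'U' then PySem.Int.floordiv ans 2
  else if c = 'L' then ans * 2
  else if c = 'R' then ans * 2 + 1
  else ans

def solve (n : Int) (x : Int) (s : String) : Int :=
  (PySem.List.pyRange 0 n 1).foldl
    (fun ans i => moveA ans (PySem.List.pyGetD s.toList i ' ')) x

-- ===== PORT B =====
-- one step of B's first pass: cancel a pending L/R against a 'U', else push a valid move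
def stepStack (st : List Char) (c : Char) : List Char :=
  if c = 'U' then
    match st.getLast? with
    | some t => if t ≠ 'U' then st.dropLast else st ++ [c]
    | none => st ++ [c]
  else if c = 'L' ∨ c = 'R' then st ++ [c]
  else st

-- one step of B's second pass (the stack holds only 'U'/'L'/'R')
def applyMove (ans : Int) (c : Char) : Int :=
  if c = 'U' then PySem.Int.floordiv ans 2
  else if c = 'L' then ans * 2
  else ans * 2 + 1

def solve_alt (n : Int) (x : Int) (s : String) : Int :=
  let st := (PySem.List.pyRange 0 n 1).foldl
    (fun st i => stepStack st (PySem.List.pyGetD s.toList i ' ')) []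
  st.foldl applyMove x

-- ===== PRECONDITION & SPEC =====
-- Python A raises IndexError when n exceeds len(s); exactly those inputs are excluded.
def Pre_solve (n : Int) (x : Int) (s : String) : Prop := n ≤ (s.toList.length : Int)
instance (n : Int) (x : Int) (s : String) : Decidable (Pre_solve n x s) := by unfold Pre_solve; infer_instance

def pvWitness_solve : Int × Int × String := (4, 5, "LRUU")

def Spec_solve (n : Int) (x : Int) (s : String) (out : Int) : Prop := out = solve_alt n x s
instance (n : Int) (x : Int) (s : String) (out : Int) : Decidable (Spec_solve n x s out) := by unfold Spec_solve; infer_instance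

-- ===== CLAIM (what is proved, stated in full; the proofs are below) =====
def Claim_equal_solve : Prop := ∀ (n : Int) (x : Int) (s : String), Dom_solve n x s → Pre_solve n x s → Spec_solve n x s (solve n x s)

-- ===== LEMMAS AND PROOFS =====

-- folding an index loop over pyRange 0 n with pyGetD equals folding over take n
theorem foldl_pyRange_take {α : Type} (f : α → Char → α) (cs : List Char) (n : Int)
    (d : Char) (x : α) (h : n ≤ (cs.length : Int)) :
    (PySem.List.pyRange 0 n 1).foldl (fun a i => f a (PySem.List.pyGetD cs i d)) x
      = (cs.take n.toNat).foldl f x := by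
  by_cases hn : n ≤ 0
  · rw [PySem.List.pyRange_one_eq_nil hn]
    have : n.toNat = 0 := by omega
    simp [this]
  · have hm : n = (n.toNat : Int) := by omega
    have hlen : (cs.take n.toNat).length = n.toNat := by
      simp; omega
    have := PySem.List.foldl_pyRange_zero_pyGetD (cs.take n.toNat) d f x
    rw [show PySem.List.len (cs.take n.toNat) = n from by
        simp [PySem.List.len_eq, hlen]; omega] at this
    rw [← this]
    apply PySem.List.foldl_congr_mem
    intro a i hi
    rw [PySem.List.mem_pyRange_one] at hi
    have h1 : PySem.List.pyGetD cs i d = cs[i.toNat]'(by omega) :=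
      PySem.List.pyGetD_eq_getElem cs d hi.1 (by omega)
    have h2 : PySem.List.pyGetD (cs.take n.toNat) i d = (cs.take n.toNat)[i.toNat]'(by omega) :=
      PySem.List.pyGetD_eq_getElem (cs.take n.toNat) d hi.1 (by omega)
    rw [h1, h2]
    congr 1
    simp

theorem stack_inv (st : List Char) (c : Char)
    (h : ∀ t ∈ st, t = 'U' ∨ t = 'L' ∨ t = 'R') :
    ∀ t ∈ stepStack st c, t = 'U' ∨ t = 'L' ∨ t = 'R' := by
  intro t ht
  unfold stepStack at ht
  split_ifs at ht with h1 h2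
  · subst h1
    rcases hlast : st.getLast? with _ | tl <;> rw [hlast] at ht <;> dsimp only at ht
    · rcases List.mem_append.1 ht with h4 | h4
      · exact h t h4
      · simp at h4; simp [h4]
    · split_ifs at ht with h3
      · exact h t (List.dropLast_subset st ht)
      · rcases List.mem_append.1 ht with h4 | h4
        · exact h t h4
        · simp at h4; simp [h4]
  · rcases List.mem_append.1 ht with h4 | h4
    · exact h t h4
    · simp at h4; rcases h2 with h2 | h2 <;> simp [h4, h2]
  · exact h t ht

-- one step of the reduction preserves the meaning of the stack
theorem step_sound (st : List Char) (c : Char) (x : Int)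
    (h : ∀ t ∈ st, t = 'U' ∨ t = 'L' ∨ t = 'R') :
    (stepStack st c).foldl applyMove x = moveA (st.foldl applyMove x) c := by
  have happ : ∀ (l : List Char) (d : Char),
      (l ++ [d]).foldl applyMove x = applyMove (l.foldl applyMove x) d := by
    intro l d; rw [List.foldl_append]; rfl
  unfold stepStack
  split_ifs with h1 h2
  · subst h1
    rcases hlast : st.getLast? with _ | tl
    · have hnil : st = [] := List.getLast?_eq_none_iff.1 hlast
      subst hnil
      simp [applyMove, moveA]
    · obtain ⟨l', rfl⟩ := List.getLast?_eq_some_iff.1 hlast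
      dsimp only
      split_ifs with h3
      · -- pop: tl ∈ {L, R}, and (2y)//2 = y, (2y+1)//2 = y
        have htl : tl = 'L' ∨ tl = 'R' := by
          have := h tl (by simp)
          tauto
        rw [List.dropLast_concat, List.foldl_append]
        rcases htl with htl | htl <;> subst htl <;> simp [applyMove, moveA] <;> omega
      · rw [happ]; simp [applyMove, moveA]
  · rw [happ]
    rcases h2 with h2 | h2 <;> simp [h2, applyMove, moveA]
  · have hcR : c ≠ 'R' := by
      intro hc; exact h2 (Or.inr hc)
    have hcL : c ≠ 'L' := by
      intro hc; exact h2 (Or.inl hc)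
    simp [moveA, h1, hcL, hcR]

-- applying the reduced stack equals applying the raw moves
theorem reduce_sound (cs : List Char) : ∀ (st : List Char) (x : Int),
    (∀ t ∈ st, t = 'U' ∨ t = 'L' ∨ t = 'R') →
    (cs.foldl stepStack st).foldl applyMove x = cs.foldl moveA (st.foldl applyMove x) := by
  induction cs with
  | nil => intro st x h; rfl
  | cons c cs ih =>
    intro st x h
    simp only [List.foldl_cons]
    rw [ih (stepStack st c) x (stack_inv st c h), step_sound st c x h]

-- ===== VERDICT (by name: the statement is the Claim_ definition above) =====
theorem solve_spec : Claim_equal_solve := by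
  intro n x s _ hpre
  unfold Spec_solve solve solve_alt
  rw [foldl_pyRange_take moveA s.toList n ' ' x hpre,
      foldl_pyRange_take stepStack s.toList n ' ' [] hpre]
  exact (reduce_sound _ [] x (by simp)).symm
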